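-- pv_equiv track=rewrite | github.com/Vergil0327/leetcode-history | 1-D Dynamic Programming/2266. Count Number of Texts/solution.py | countTexts
-- ===== SOURCE A (Python) =====
-- def countTexts(s: str) -> int:
--     mod = 10**9+7
--
--     # key: # of characters
--     length = {"2":3, "3":3, "4":3, "5":3, "6":3, "7":4, "8":3, "9":4}
--     n = len(s)
--
--     s = "#" + s
--
--     dp = [0]*(n+1)
--     dp[0] = 1
--
--     # 1-indexed
--     for i in range(1, n+1):
--         dp[i] += dp[i-1]
--
--         if s[i] == s[i-1]:
--             l = length.get(s[i], 0)
--             for j in range(i-1, max(0, i-l), -1):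
--                 if s[i] == s[j]:
--                     dp[i] += dp[j-1]
--                 else:
--                     break
--         dp[i] %= mod
--
--     return dp[n]
-- ===== SOURCE B (Python) =====
-- def countTexts(s: str) -> int:
--     MOD = 10**9 + 7
--     res = 1
--     i, n = 0, len(s)
--     while i < n:
--         j = i
--         while j < n and s[j] == s[i]:
--             j += 1
--         ch, L = s[i], j - i
--         m = 4 if ch in "79" else 3 if ch in "234568" else 1
--         f = [1]
--         for k in range(1, L + 1):
--             f.append(sum(f[max(0, k - m):]) % MOD)
--         res = res * f[L] % MOD
--         i = j
--     return res
-- ===== Notes on version B (the rewrite author's own statement) =====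
-- stated objective: alternative
-- what changed: Replaces the global 1-indexed DP array with inner backward scans over a sentinel-prefixed string by a decomposition into maximal runs of equal characters: each run's count is a short window recurrence and the answer is the product of the per-run counts mod 1e9+7.
import Mathlib
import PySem

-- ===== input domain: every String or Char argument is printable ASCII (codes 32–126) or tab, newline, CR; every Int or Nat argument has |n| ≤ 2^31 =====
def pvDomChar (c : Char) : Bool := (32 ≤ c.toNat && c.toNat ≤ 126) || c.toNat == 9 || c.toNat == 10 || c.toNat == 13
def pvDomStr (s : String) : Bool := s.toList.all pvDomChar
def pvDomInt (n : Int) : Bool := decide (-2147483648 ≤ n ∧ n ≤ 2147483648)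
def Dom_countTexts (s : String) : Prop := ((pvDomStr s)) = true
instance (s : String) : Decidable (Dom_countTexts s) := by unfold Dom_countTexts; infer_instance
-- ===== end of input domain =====

-- B replaces A's global 1-indexed DP array (with backward inner scans over a sentinel-prefixed
-- string) by a decomposition into maximal runs of equal characters: each run contributes a
-- short window-recurrence count and the answer is the product of these counts mod 1e9+7.

-- ===== PORT A =====
def pvMod : Int := 10 ^ 9 + 7

-- length = {"2":3, ..., "9":4}
def pvLenMap : PySem.Dict Char Int :=
  PySem.Dict.mk [('2',3),('3',3),('4',3),('5',3),('6',3),('7',4),('8',3),('9',4)]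

-- inner 'for j in range(i-1, max(0, i-l), -1): if s[i]==s[j]: dp[i]+=dp[j-1] else: break'
def pvInnerA (c : List Char) (dp : List Int) (ci : Char) : List Int → Int → Int
  | [], acc => acc
  | j :: js, acc =>
    if PySem.List.pyGetD c j '#' = ci then
      pvInnerA c dp ci js (acc + PySem.List.pyGetD dp (j - 1) 0)
    else acc

-- one iteration of the main 'for i in range(1, n+1)' loop (dp grows by its new cell)
def pvStepA (c : List Char) (dp : List Int) (i : Int) : List Int :=
  let v0 := PySem.List.pyGetD dp (i - 1) 0
  let si := PySem.List.pyGetD c i '#'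
  let v :=
    if si = PySem.List.pyGetD c (i - 1) '#' then
      pvInnerA c dp si
        (PySem.List.pyRange (i - 1) (max 0 (i - PySem.Dict.getD pvLenMap si 0)) (-1)) v0
    else v0
  dp ++ [v % pvMod]

-- the whole dp array for the '#'-prefixed character list
def pvDpA (u : List Char) : List Int :=
  (PySem.List.pyRange 1 ((u.length : Int) + 1) 1).foldl (pvStepA ('#' :: u)) [1]

def countTexts (s : String) : Int :=
  PySem.List.pyGetD (pvDpA s.toList) ((s.toList.length : Int)) 0

-- ===== PORT B =====
-- maximal runs of equal consecutive characters (the two nested while loops of B)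
def pvRunsB : List Char → List (Char × Nat)
  | [] => []
  | c :: rest =>
    (c, (rest.takeWhile (· == c)).length + 1) :: pvRunsB (rest.dropWhile (· == c))
termination_by l => l.length
decreasing_by
  simp only [List.length_cons]
  exact Nat.lt_succ_of_le (List.length_dropWhile_le _ _)

-- m = 4 if ch in "79" else 3 if ch in "234568" else 1
def pvWin (ch : Char) : Int :=
  if ch = '7' ∨ ch = '9' then 4
  else if ch = '2' ∨ ch = '3' ∨ ch = '4' ∨ ch = '5' ∨ ch = '6' ∨ ch = '8' then 3
  else 1

-- f = [1]; for k in range(1, L+1): f.append(sum(f[max(0, k-m):]) % MOD); return f[L]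
def pvWays (m : Int) (L : Nat) : Int :=
  let f := (List.range L).foldl
    (fun f _ =>
      f ++ [(PySem.List.slice f (some (max 0 ((f.length : Int) - m))) none).sum % pvMod]) [1]
  PySem.List.pyGetD f ((L : Int)) 0

def pvBval (u : List Char) : Int :=
  (pvRunsB u).foldl (fun res r => res * pvWays (pvWin r.1) r.2 % pvMod) 1

def countTexts_alt (s : String) : Int := pvBval s.toList

-- ===== PRECONDITION & SPEC =====
def Spec_countTexts (s : String) (out : Int) : Prop := out = countTexts_alt s
instance (s : String) (out : Int) : Decidable (Spec_countTexts s out) := by unfold Spec_countTexts; infer_instance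

-- ===== CLAIM (what is proved, stated in full; the proofs are below) =====
def Claim_equal_countTexts : Prop := ∀ (s : String), Dom_countTexts s → Spec_countTexts s (countTexts s)

-- ===== LEMMAS AND PROOFS =====

-- window size as a natural number (4 for 7/9, 3 for other digits 2-8, 1 otherwise)
def wnd (ch : Char) : Nat :=
  if ch = '7' ∨ ch = '9' then 4
  else if ch = '2' ∨ ch = '3' ∨ ch = '4' ∨ ch = '5' ∨ ch = '6' ∨ ch = '8' then 3
  else 1

-- (f k, f (k-1), f (k-2), f (k-3)) of the window recurrence, mod pvMod
def fvec (m : Nat) : Nat → Int × Int × Int × Int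
  | 0 => (1, 0, 0, 0)
  | k + 1 =>
    let p := fvec m k
    ((p.1 + (if 2 ≤ m then p.2.1 else 0) + (if 3 ≤ m then p.2.2.1 else 0) +
      (if 4 ≤ m then p.2.2.2 else 0)) % pvMod, p.1, p.2.1, p.2.2.1)

def fA (m k : Nat) : Int := (fvec m k).1

def stepSum (m k : Nat) : Int :=
  (fvec m k).1 + (if 2 ≤ m then (fvec m k).2.1 else 0) +
    (if 3 ≤ m then (fvec m k).2.2.1 else 0) + (if 4 ≤ m then (fvec m k).2.2.2 else 0)

lemma fA_succ (m k : Nat) : fA m (k + 1) = stepSum m k % pvMod := rfl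

lemma wnd_cases (ch : Char) : wnd ch = 1 ∨ wnd ch = 3 ∨ wnd ch = 4 := by
  unfold wnd; split_ifs <;> simp

lemma pvWin_eq (ch : Char) : pvWin ch = ((wnd ch : Nat) : Int) := by
  unfold pvWin wnd; split_ifs <;> rfl

lemma pvLen_eq (ch : Char) :
    PySem.Dict.getD pvLenMap ch 0 = (if wnd ch = 1 then (0 : Int) else ((wnd ch : Nat) : Int)) := by
  unfold pvLenMap wnd
  simp only [PySem.Dict.getD_eq_get?_getD, PySem.Dict.get?_mk_cons]
  by_cases h2 : '2' = ch
  · subst h2; decide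
  by_cases h3 : '3' = ch
  · subst h3; decide
  by_cases h4 : '4' = ch
  · subst h4; decide
  by_cases h5 : '5' = ch
  · subst h5; decide
  by_cases h6 : '6' = ch
  · subst h6; decide
  by_cases h7 : '7' = ch
  · subst h7; decide
  by_cases h8 : '8' = ch
  · subst h8; decide
  by_cases h9 : '9' = ch
  · subst h9; decide
  have n2 : ch ≠ '2' := fun h => h2 h.symm
  have n3 : ch ≠ '3' := fun h => h3 h.symm
  have n4 : ch ≠ '4' := fun h => h4 h.symm
  have n5 : ch ≠ '5' := fun h => h5 h.symm
  have n6 : ch ≠ '6' := fun h => h6 h.symm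
  have n7 : ch ≠ '7' := fun h => h7 h.symm
  have n8 : ch ≠ '8' := fun h => h8 h.symm
  have n9 : ch ≠ '9' := fun h => h9 h.symm
  simp [h2, h3, h4, h5, h6, h7, h8, h9, n2, n3, n4, n5, n6, n7, n8, n9, PySem.Dict.get?]

-- mod arithmetic helpers
lemma pv_mod_pos : (0 : Int) < pvMod := by norm_num [pvMod]

lemma pv_add_emod_left (x y : Int) : (x % pvMod + y) % pvMod = (x + y) % pvMod := by
  conv_rhs => rw [Int.add_emod]
  rw [Int.add_emod (x % pvMod) y, Int.emod_emod_of_dvd _ dvd_rfl]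

lemma pv_mul_emod_right (p x : Int) : p * (x % pvMod) % pvMod = p * x % pvMod := by
  conv_rhs => rw [Int.mul_emod]
  rw [Int.mul_emod p (x % pvMod), Int.emod_emod_of_dvd _ dvd_rfl]

-- ----- fvec component lemmas -----
lemma fvec_21 (m k : Nat) : (fvec m (k + 1)).2.1 = fA m k := rfl
lemma fvec_221 (m k : Nat) : (fvec m (k + 2)).2.2.1 = fA m k := rfl
lemma fvec_222 (m k : Nat) : (fvec m (k + 3)).2.2.2 = fA m k := rfl

lemma fA_zero (m : Nat) : fA m 0 = 1 := rfl

lemma fA_one (m : Nat) : fA m 1 = 1 := by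
  show (fvec m (0 + 1)).1 = 1
  simp [fvec, pvMod]

-- the sum of the last min(k+1, m) values f(k), f(k-1), ... equals the fvec step sum
lemma sum_tail (mb : Nat) (hmb : mb = 1 ∨ mb = 3 ∨ mb = 4) (k : Nat) :
    (((List.range (k + 1)).map (fA mb)).drop ((k + 1) - min (k + 1) mb)).sum = stepSum mb k := by
  rcases hmb with h | h | h <;> subst h
  · rw [show (k + 1) - min (k + 1) 1 = k by omega,
        show List.range (k + 1) = List.range k ++ List.map (fun i => k + i) (List.range 1)
          from List.range_add,
        List.map_append,
        List.drop_left' (show ((List.range k).map (fA 1)).length = k by simp)]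
    simp [stepSum, fA]
  · match k with
    | 0 => decide
    | 1 => decide
    | (k' + 2) =>
      rw [show (k' + 2 + 1) - min (k' + 2 + 1) 3 = k' by omega,
          show List.range (k' + 2 + 1) = List.range k' ++ List.map (fun i => k' + i) (List.range 3)
            by rw [show k' + 2 + 1 = k' + 3 by omega]; exact List.range_add,
          List.map_append,
          List.drop_left' (show ((List.range k').map (fA 3)).length = k' by simp)]
      simp only [show List.range 3 = [0, 1, 2] from rfl, List.map_cons, List.map_nil,
        List.sum_cons, List.sum_nil, Nat.add_zero]
      simp only [stepSum, show ((2:Nat) ≤ 3) = True by simp, show ((3:Nat) ≤ 3) = True by simp,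
        show ((4:Nat) ≤ 3) = False by simp, if_true, if_false]
      rw [show k' + 2 = (k' + 1) + 1 by omega, fvec_21 3 (k' + 1),
          show (k' + 1) + 1 = k' + 2 by omega, fvec_221 3 k']
      simp only [fA]; ring
  · match k with
    | 0 => decide
    | 1 => decide
    | 2 => decide
    | (k' + 3) =>
      rw [show (k' + 3 + 1) - min (k' + 3 + 1) 4 = k' by omega,
          show List.range (k' + 3 + 1) = List.range k' ++ List.map (fun i => k' + i) (List.range 4)
            by rw [show k' + 3 + 1 = k' + 4 by omega]; exact List.range_add,
          List.map_append,
          List.drop_left' (show ((List.range k').map (fA 4)).length = k' by simp)]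
      simp only [show List.range 4 = [0, 1, 2, 3] from rfl, List.map_cons, List.map_nil,
        List.sum_cons, List.sum_nil, Nat.add_zero]
      simp only [stepSum, show ((2:Nat) ≤ 4) = True by simp, show ((3:Nat) ≤ 4) = True by simp,
        show ((4:Nat) ≤ 4) = True by simp, if_true]
      rw [show k' + 3 = (k' + 2) + 1 by omega, fvec_21 4 (k' + 2),
          show (k' + 2) + 1 = (k' + 1) + 2 by omega, fvec_221 4 (k' + 1),
          show (k' + 1) + 2 = k' + 3 by omega, fvec_222 4 k']
      simp only [fA]; ring

-- ----- B side: the f-list loop computes fA -----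
lemma ways_loop (mb : Nat) (hmb : mb = 1 ∨ mb = 3 ∨ mb = 4) (j : Nat) :
    (List.range j).foldl
      (fun f (_ : Nat) =>
        f ++ [(PySem.List.slice f (some (max 0 ((f.length : Int) - (mb : Int)))) none).sum % pvMod]) [1]
      = (List.range (j + 1)).map (fA mb) := by
  induction j with
  | zero => simp [List.range_one, fA_zero]
  | succ j ih =>
    rw [List.range_succ, List.foldl_append, ih]
    simp only [List.foldl_cons, List.foldl_nil]
    have hlen : ((List.range (j + 1)).map (fA mb)).length = j + 1 := by simp
    have ha : (0 : Int) ≤ max 0 ((((List.range (j + 1)).map (fA mb)).length : Int) - (mb : Int)) :=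
      le_max_left _ _
    rw [PySem.List.slice_from _ ha]
    have htn : (max 0 ((((List.range (j + 1)).map (fA mb)).length : Int) - (mb : Int))).toNat
        = (j + 1) - min (j + 1) mb := by
      rw [hlen]; omega
    rw [htn, sum_tail mb hmb j, ← fA_succ]
    rw [List.range_succ (n := j + 1), List.map_append]
    rfl

lemma pvWays_eq_fA (mb : Nat) (hmb : mb = 1 ∨ mb = 3 ∨ mb = 4) (L : Nat) :
    pvWays ((mb : Nat) : Int) L = fA mb L := by
  unfold pvWays
  rw [ways_loop mb hmb L]
  rw [PySem.List.pyGetD_natCast]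
  exact PySem.List.getD_map_range _ _ _ _ (by omega)

-- ----- runs lemmas -----
lemma runs_replicate (x : Char) (K : Nat) :
    pvRunsB (List.replicate (K + 1) x) = [(x, K + 1)] := by
  rw [List.replicate_succ, pvRunsB]
  simp [pvRunsB]

lemma getLast?_cons_all (c : Char) (rest : List Char) (h : ∀ y ∈ rest, y = c) :
    (c :: rest).getLast? = some c := by
  induction rest generalizing c with
  | nil => rfl
  | cons y t ih =>
    have hy : y = c := h y (by simp)
    rw [List.getLast?_cons_cons, ih y (fun z hz => (h z (by simp [hz])).trans hy.symm), hy]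

lemma runs_snoc_run (p : List Char) (x : Char) (K : Nat)
    (hb : p = [] ∨ p.getLast? ≠ some x) :
    pvRunsB (p ++ List.replicate (K + 1) x) = pvRunsB p ++ [(x, K + 1)] := by
  obtain ⟨n, hn⟩ : ∃ n, p.length ≤ n := ⟨p.length, le_refl _⟩
  induction n generalizing p with
  | zero =>
    have hp : p = [] := by
      cases p with | nil => rfl | cons a b => simp at hn
    subst hp
    simpa [pvRunsB] using runs_replicate x K
  | succ n ih =>
    cases p with
    | nil => simpa [pvRunsB] using runs_replicate x K
    | cons c rest =>
      rw [List.cons_append, pvRunsB]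
      conv_rhs => rw [pvRunsB]
      by_cases hall : ∀ y ∈ rest, y = c
      · have hlast : (c :: rest).getLast? = some c := getLast?_cons_all c rest hall
        have hcx : c ≠ x := by
          rcases hb with h | h
          · simp at h
          · intro hcx; exact h (hlast.trans (by rw [hcx]))
        have htw : rest.takeWhile (· == c) = rest := by
          rw [List.takeWhile_eq_self_iff]
          intro y hy; simp [hall y hy]
        have hdw : rest.dropWhile (· == c) = [] := by
          rw [List.dropWhile_eq_nil_iff]
          intro y hy; simp [hall y hy]
        rw [List.takeWhile_append, if_pos (by rw [htw]), List.dropWhile_append,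
            if_pos (by rw [hdw]; rfl)]
        rw [List.takeWhile_replicate, List.dropWhile_replicate,
            if_neg (by simp [Ne.symm hcx]), if_neg (by simp [Ne.symm hcx])]
        rw [htw, hdw, runs_replicate]
        simp [pvRunsB]
      · have hne : ∃ y ∈ rest, ¬y = c := by
          push Not at hall; exact hall
        have h1 : ¬(rest.takeWhile (· == c)).length = rest.length := by
          intro h
          have heq := (List.takeWhile_prefix (l := rest) (· == c)).eq_of_length h
          obtain ⟨y, hy, hyc⟩ := hne
          have := List.mem_takeWhile_imp (by rw [heq]; exact hy)
          simp at this; exact hyc this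
        have h2 : ¬(rest.dropWhile (· == c)).isEmpty = true := by
          rw [List.isEmpty_iff, List.dropWhile_eq_nil_iff]
          obtain ⟨y, hy, hyc⟩ := hne
          intro h
          have := h y hy; simp at this; exact hyc this
        rw [List.takeWhile_append, if_neg h1, List.dropWhile_append, if_neg h2]
        have hdne : rest.dropWhile (· == c) ≠ [] := by
          intro h; exact h2 (by rw [h]; rfl)
        have hrestne : rest ≠ [] := by
          intro h; subst h; exact hdne rfl
        obtain ⟨u, hu⟩ := List.dropWhile_suffix (l := rest) (· == c)
        have hlastd : (rest.dropWhile (· == c)).getLast? = (c :: rest).getLast? := by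
          have hg1 : (c :: rest).getLast? = rest.getLast? := by
            cases rest with
            | nil => exact absurd rfl hrestne
            | cons a b => exact List.getLast?_cons_cons
          rw [hg1]
          conv_rhs => rw [← hu]
          rw [List.getLast?_append,
            Option.or_of_isSome (by rw [List.getLast?_isSome]; exact hdne)]
        rw [List.cons_append]
        congr 1
        apply ih (rest.dropWhile (· == c))
        · right
          rw [hlastd]
          rcases hb with h | h
          · exact absurd h (by simp)
          · exact h
        · have := List.length_dropWhile_le (· == c) rest
          simp at hn; omega

-- every nonempty list ends in a maximal run
lemma run_decomp (u : List Char) (hu : u ≠ []) :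
    ∃ p x K, u = p ++ List.replicate (K + 1) x ∧ (p = [] ∨ p.getLast? ≠ some x) := by
  induction u using List.reverseRecOn with
  | nil => exact absurd rfl hu
  | append_singleton w y ih =>
    rcases eq_or_ne w [] with hw | hw
    · exact ⟨[], y, 0, by simp [hw], Or.inl rfl⟩
    obtain ⟨p, x, K, hdec, hb⟩ := ih hw
    rcases eq_or_ne x y with hxy | hxy
    · refine ⟨p, x, K + 1, ?_, hb⟩
      rw [hdec, hxy, List.append_assoc, ← List.replicate_succ' (n := K + 1)]
    · refine ⟨w, y, 0, by simp, Or.inr ?_⟩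
      rw [hdec, List.getLast?_append, List.getLast?_replicate, if_neg (by omega)]
      simp
      exact fun h => hxy (by simpa using h)

-- ----- A side -----
lemma pyGetD_append_lt (A : List Char) (x : Char) (j : Int) (h0 : 0 ≤ j)
    (h : j < (A.length : Int)) :
    PySem.List.pyGetD (A ++ [x]) j '#' = PySem.List.pyGetD A j '#' := by
  have hjn : j.toNat < A.length := by omega
  rw [PySem.List.pyGetD_eq_getElem (A ++ [x]) '#' h0 (by push_cast [List.length_append]; omega),
      PySem.List.pyGetD_eq_getElem A '#' h0 (by exact_mod_cast h)]
  exact List.getElem_append_left hjn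

lemma innerA_congr (c1 c2 : List Char) (dp : List Int) (ci : Char) :
    ∀ (js : List Int) (acc : Int),
      (∀ j ∈ js, PySem.List.pyGetD c1 j '#' = PySem.List.pyGetD c2 j '#') →
      pvInnerA c1 dp ci js acc = pvInnerA c2 dp ci js acc := by
  intro js
  induction js with
  | nil => intro acc _; rfl
  | cons j t ih =>
    intro acc hch
    simp only [pvInnerA]
    rw [hch j (by simp)]
    split
    · exact ih _ (fun j hj => hch j (by simp [hj]))
    · rfl

lemma stepA_congr (w : List Char) (x : Char) (dp : List Int) (i : Int)
    (h1 : 1 ≤ i) (h2 : i ≤ (w.length : Int)) :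
    pvStepA (('#' :: w) ++ [x]) dp i = pvStepA ('#' :: w) dp i := by
  have hlen : (('#' :: w).length : Int) = (w.length : Int) + 1 := by simp
  have hi : PySem.List.pyGetD (('#' :: w) ++ [x]) i '#' = PySem.List.pyGetD ('#' :: w) i '#' := by
    apply pyGetD_append_lt _ _ _ (by omega); omega
  have hi1 : PySem.List.pyGetD (('#' :: w) ++ [x]) (i - 1) '#'
      = PySem.List.pyGetD ('#' :: w) (i - 1) '#' := by
    apply pyGetD_append_lt _ _ _ (by omega); omega
  simp only [pvStepA, hi, hi1]
  split
  · have hch : ∀ j ∈ PySem.List.pyRange (i - 1)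
        (max 0 (i - pvLenMap.getD (PySem.List.pyGetD ('#' :: w) i '#') 0)) (-1),
        PySem.List.pyGetD (('#' :: w) ++ [x]) j '#' = PySem.List.pyGetD ('#' :: w) j '#' := by
      intro j hj
      have hm := PySem.List.mem_pyRange_neg_one.mp hj
      apply pyGetD_append_lt _ _ _ (by omega)
      simp only [List.length_cons]; push_cast; omega
    rw [innerA_congr _ _ _ _ _ _ hch]
  · rfl

lemma dpA_snoc (w : List Char) (x : Char) :
    pvDpA (w ++ [x]) = pvStepA ('#' :: (w ++ [x])) (pvDpA w) ((w.length : Int) + 1) := by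
  unfold pvDpA
  rw [show (((w ++ [x]).length : Int)) = (w.length : Int) + 1 by simp]
  rw [PySem.List.pyRange_one_succ_right (by omega)]
  rw [List.foldl_append]
  simp only [List.foldl_cons, List.foldl_nil]
  congr 1
  apply PySem.List.foldl_congr_mem
  intro dp i hi
  have hm := PySem.List.mem_pyRange_one.mp hi
  rw [show ('#' :: (w ++ [x])) = ('#' :: w) ++ [x] by simp]
  exact stepA_congr w x dp i (by omega) (by omega)

lemma dpA_nil : pvDpA [] = [1] := by
  simp [pvDpA, PySem.List.pyRange_one_eq_nil]

lemma stepA_length (c : List Char) (dp : List Int) (i : Int) :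
    (pvStepA c dp i).length = dp.length + 1 := by
  simp [pvStepA]

lemma dpA_length (u : List Char) : (pvDpA u).length = u.length + 1 := by
  induction u using List.reverseRecOn with
  | nil => rw [dpA_nil]; rfl
  | append_singleton w x _ih =>
    rw [dpA_snoc, stepA_length, _ih]
    simp

lemma dpA_bounds (u : List Char) (q : Nat) :
    0 ≤ (pvDpA u).getD q 0 ∧ (pvDpA u).getD q 0 < pvMod := by
  induction u using List.reverseRecOn generalizing q with
  | nil =>
    rw [dpA_nil]
    match q with
    | 0 => norm_num [pvMod]
    | (n+1) => norm_num [pvMod, List.getD]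
  | append_singleton w x ih =>
    rw [dpA_snoc]
    simp only [pvStepA]
    rcases lt_trichotomy q (pvDpA w).length with hq | hq | hq
    · rw [List.getD_append _ _ _ _ hq]; exact ih q
    · rw [hq, List.getD_append_right _ _ _ _ (by omega)]
      simp only [Nat.sub_self, List.getD_cons_zero]
      exact ⟨Int.emod_nonneg _ (by norm_num [pvMod]), Int.emod_lt_of_pos _ pv_mod_pos⟩
    · rw [List.getD_append_right _ _ _ _ (by omega)]
      rw [List.getD_eq_default]
      · norm_num [pvMod]
      · simp; omega

-- the break-free inner scan: all scanned characters equal ci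
lemma innerA_full (c : List Char) (dp : List Int) (ci : Char) (e : Int) :
    ∀ (k : Nat) (a : Int), a = e + (k : Int) →
      (∀ j : Int, e < j → j ≤ a → PySem.List.pyGetD c j '#' = ci) →
      ∀ acc, pvInnerA c dp ci (PySem.List.pyRange a e (-1)) acc =
        acc + ((PySem.List.pyRange a e (-1)).map (fun j => PySem.List.pyGetD dp (j - 1) 0)).sum := by
  intro k
  induction k with
  | zero =>
    intro a ha _ acc
    rw [PySem.List.pyRange_neg_one_eq_nil (by omega)]
    simp [pvInnerA]
  | succ n ih =>
    intro a ha hch acc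
    rw [PySem.List.pyRange_neg_one_cons (by omega)]
    simp only [pvInnerA]
    rw [if_pos (hch a (by omega) (by omega))]
    rw [ih (a - 1) (by omega) (fun j h1 h2 => hch j h1 (by omega))]
    simp only [List.map_cons, List.sum_cons]
    ring

-- the scan that runs into the run boundary b and breaks there
lemma innerA_break (c : List Char) (dp : List Int) (ci : Char) (b e : Int) (he : e ≤ b) :
    ∀ (k : Nat) (a : Int), a = b + (k : Int) →
      (∀ j : Int, b < j → j ≤ a → PySem.List.pyGetD c j '#' = ci) →
      PySem.List.pyGetD c b '#' ≠ ci →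
      ∀ acc, pvInnerA c dp ci (PySem.List.pyRange a e (-1)) acc =
        acc + ((PySem.List.pyRange a b (-1)).map (fun j => PySem.List.pyGetD dp (j - 1) 0)).sum := by
  intro k
  induction k with
  | zero =>
    intro a ha _ hne acc
    have hab : a = b := by omega
    rw [PySem.List.pyRange_neg_one_eq_nil (a := a) (b := b) (by omega)]
    rcases eq_or_lt_of_le (show e ≤ a by omega) with heq | hlt
    · rw [← heq, PySem.List.pyRange_neg_one_eq_nil (by omega)]
      simp [pvInnerA]
    · rw [PySem.List.pyRange_neg_one_cons hlt]
      simp only [pvInnerA]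
      rw [if_neg (by rw [hab]; exact hne)]
      simp
  | succ n ih =>
    intro a ha hch hne acc
    rw [PySem.List.pyRange_neg_one_cons (a := a) (b := b) (by omega)]
    rw [PySem.List.pyRange_neg_one_cons (a := a) (b := e) (by omega)]
    simp only [pvInnerA]
    rw [if_pos (hch a (by omega) (by omega))]
    rw [ih (a - 1) (by omega) (fun j h1 h2 => hch j h1 (by omega)) hne]
    simp only [List.map_cons, List.sum_cons]
    ring

def lastP (p : List Char) : Int := (pvDpA p).getD p.length 0

lemma pv_add_emod_right (x y : Int) : (x + y % pvMod) % pvMod = (x + y) % pvMod := by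
  rw [add_comm x (y % pvMod), pv_add_emod_left, add_comm]

-- characters inside the run are x
lemma char_at_run (p : List Char) (x : Char) (L : Nat) (j : Int)
    (h1 : (p.length : Int) + 1 ≤ j) (h2 : j ≤ (p.length : Int) + L) :
    PySem.List.pyGetD ('#' :: (p ++ List.replicate L x)) j '#' = x := by
  rw [show ('#' :: (p ++ List.replicate L x)) = ('#' :: p) ++ List.replicate L x from rfl]
  rw [PySem.List.pyGetD_eq_getElem _ '#' (by omega) (by simp; push_cast; omega)]
  rw [List.getElem_append_right (by simp; omega)]
  exact List.getElem_replicate _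

-- the character just before the run differs from x (x a digit, hence ≠ '#')
lemma char_at_base (p : List Char) (x : Char) (L : Nat)
    (hb : p = [] ∨ p.getLast? ≠ some x) (hx : x ≠ '#') :
    PySem.List.pyGetD ('#' :: (p ++ List.replicate L x)) ((p.length : Int)) '#' ≠ x := by
  cases p with
  | nil => simpa [PySem.List.pyGetD_zero_cons] using Ne.symm hx
  | cons a p' =>
    have hbl : (a :: p').getLast? ≠ some x := by
      rcases hb with h | h
      · simp at h
      · exact h
    rw [show ('#' :: ((a :: p') ++ List.replicate L x)) = ('#' :: (a :: p')) ++ List.replicate L x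
        from rfl]
    rw [PySem.List.pyGetD_eq_getElem _ '#' (by omega) (by simp)]
    rw [List.getElem_append_left (by simp)]
    intro hc
    simp only [Int.toNat_natCast] at hc
    have h2 : ('#' :: a :: p').getLast? = some x := by
      rw [List.getLast?_eq_getElem?]
      rw [show ('#' :: a :: p').length - 1 = (a :: p').length by simp]
      rw [List.getElem?_eq_getElem (by simp)]
      simpa using hc
    exact hbl (by rwa [List.getLast?_cons_cons] at h2)

lemma wnd_ne_hash (x : Char) (h : wnd x ≠ 1) : x ≠ '#' := by
  unfold wnd at h
  split_ifs at h with h1 h2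
  · rcases h1 with h1 | h1 <;> subst h1 <;> decide
  · rcases h2 with h2 | h2 | h2 | h2 | h2 | h2 <;> subst h2 <;> decide
  · exact absurd rfl h

-- final list step: appending the next dp cell extends the mapped range
lemma snoc_map_step (dpp : List Int) (g : Nat → Int) (K : Nat) (v : Int)
    (hv : v = g (K + 1)) :
    (dpp ++ (List.range (K + 1)).map g) ++ [v] = dpp ++ (List.range (K + 1 + 1)).map g := by
  rw [hv]
  conv_rhs => rw [List.range_succ, List.map_append]
  rw [List.append_assoc]
  rfl

lemma stepSum_one (k : Nat) : stepSum 1 k = fA 1 k := by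
  simp [stepSum, fA]

lemma stepSum_three_one : stepSum 3 1 = fA 3 1 + fA 3 0 := by decide

lemma stepSum_three (k : Nat) : stepSum 3 (k + 2) = fA 3 (k + 2) + fA 3 (k + 1) + fA 3 k := by
  simp only [stepSum, show ((2:Nat) ≤ 3) = True by simp, show ((3:Nat) ≤ 3) = True by simp,
    show ((4:Nat) ≤ 3) = False by simp, if_true, if_false]
  rw [show k + 2 = (k + 1) + 1 by omega, fvec_21, show (k + 1) + 1 = k + 2 by omega, fvec_221]
  simp only [fA]
  all_goals ring

lemma stepSum_four_one : stepSum 4 1 = fA 4 1 + fA 4 0 := by decide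

lemma stepSum_four_two : stepSum 4 2 = fA 4 2 + fA 4 1 + fA 4 0 := by decide

lemma stepSum_four (k : Nat) : stepSum 4 (k + 3) = fA 4 (k + 3) + fA 4 (k + 2) + fA 4 (k + 1) + fA 4 k := by
  simp only [stepSum, show ((2:Nat) ≤ 4) = True by simp, show ((3:Nat) ≤ 4) = True by simp,
    show ((4:Nat) ≤ 4) = True by simp, if_true]
  rw [show k + 3 = (k + 2) + 1 by omega, fvec_21, show (k + 2) + 1 = (k + 1) + 2 by omega,
      fvec_221, show (k + 1) + 2 = k + 3 by omega, fvec_222]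
  simp only [fA]
  all_goals ring

lemma pv_emod_emod (a : Int) : a % pvMod % pvMod = a % pvMod :=
  Int.emod_emod_of_dvd _ dvd_rfl

lemma pv_modeq (a : Int) : Int.ModEq pvMod (a % pvMod) a := pv_emod_emod a

-- run invariant: the dp cells of a maximal run are P * fA m q % pvMod
lemma run_inv (p : List Char) (x : Char) (K : Nat) (hb : p = [] ∨ p.getLast? ≠ some x) :
    pvDpA (p ++ List.replicate (K + 1) x) =
      pvDpA p ++ (List.range (K + 1)).map (fun q => lastP p * fA (wnd x) (q + 1) % pvMod) := by
  induction K with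
  | zero =>
    rw [show List.replicate (0 + 1) x = [x] from rfl]
    rw [dpA_snoc p x]
    simp only [pvStepA]
    have hsi := char_at_run p x 1 ((p.length : Int) + 1) (by omega) (by push_cast; omega)
    rw [List.replicate_one] at hsi
    rw [hsi]
    have hval : PySem.List.pyGetD (pvDpA p) ((p.length : Int) + 1 - 1) 0 % pvMod
        = lastP p * fA (wnd x) (0 + 1) % pvMod := by
      rw [show ((p.length : Int) + 1 - 1) = ((p.length : Nat) : Int) by push_cast; ring]
      rw [PySem.List.pyGetD_natCast, fA_one, mul_one]
      rw [Int.emod_eq_of_lt (dpA_bounds p p.length).1 (dpA_bounds p p.length).2]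
      exact (Int.emod_eq_of_lt (dpA_bounds p p.length).1 (dpA_bounds p p.length).2).symm
    by_cases hg : x = PySem.List.pyGetD ('#' :: (p ++ [x])) ((p.length : Int) + 1 - 1) '#'
    · have hw1 : wnd x = 1 := by
        by_contra hne1
        have hcb := char_at_base p x 1 hb (wnd_ne_hash x hne1)
        rw [List.replicate_one] at hcb
        apply hcb
        rw [show ((p.length : Int)) = ((p.length : Int) + 1 - 1) by ring]
        exact hg.symm
      rw [if_pos hg, pvLen_eq x, hw1, if_pos rfl]
      rw [show ((p.length : Int) + 1 - (0 : Int)) = (p.length : Int) + 1 by ring]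
      rw [show max 0 ((p.length : Int) + 1) = (p.length : Int) + 1 by omega]
      rw [PySem.List.pyRange_neg_one_eq_nil (by omega)]
      simp only [pvInnerA]
      rw [List.range_one]
      simp only [List.map_cons, List.map_nil]
      rw [hval, hw1]
    · rw [if_neg hg]
      rw [List.range_one]
      simp only [List.map_cons, List.map_nil]
      rw [hval]
  | succ K ihK =>
    have hrepl : p ++ List.replicate (K + 1 + 1) x
        = (p ++ List.replicate (K + 1) x) ++ [x] := by
      rw [List.replicate_succ' (n := K + 1), List.append_assoc]
    rw [hrepl, dpA_snoc, ← hrepl]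
    rw [show (((p ++ List.replicate (K + 1) x).length : Nat) : Int) + 1
        = (p.length : Int) + (K + 1) + 1 by push_cast [List.length_append, List.length_replicate]; omega]
    simp only [pvStepA]
    have hget : ∀ q : Nat, q ≤ K + 1 →
        PySem.List.pyGetD (pvDpA (p ++ List.replicate (K + 1) x))
          ((p.length : Int) + (q : Int)) 0 = lastP p * fA (wnd x) q % pvMod := by
      intro q hq
      rw [show ((p.length : Int) + (q : Int)) = (((p.length + q : Nat) : Nat) : Int)
          by push_cast; ring]
      rw [PySem.List.pyGetD_natCast]
      rw [ihK]
      match q, hq with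
      | 0, _ =>
        rw [List.getD_append _ _ _ _ (by rw [dpA_length]; omega)]
        rw [fA_zero, mul_one]
        rw [show p.length + 0 = p.length from rfl]
        exact (Int.emod_eq_of_lt (dpA_bounds p p.length).1 (dpA_bounds p p.length).2).symm
      | (q' + 1), hq =>
        rw [List.getD_append_right _ _ _ _ (by rw [dpA_length]; omega), dpA_length]
        rw [show p.length + (q' + 1) - (p.length + 1) = q' by omega]
        rw [PySem.List.getD_map_range _ _ _ _ (by omega)]
    have hv0 : PySem.List.pyGetD (pvDpA (p ++ List.replicate (K + 1) x))
        ((p.length : Int) + (K + 1) + 1 - 1) 0 = lastP p * fA (wnd x) (K + 1) % pvMod := by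
      rw [show ((p.length : Int) + (K + 1) + 1 - 1) = ((p.length : Int) + ((K + 1 : Nat) : Int))
          by push_cast; ring]
      exact hget (K + 1) (le_refl _)
    have hsi := char_at_run p x (K + 1 + 1) ((p.length : Int) + (K + 1) + 1)
      (by omega) (by push_cast; omega)
    rw [hsi]
    have hsi1 := char_at_run p x (K + 1 + 1) ((p.length : Int) + (K + 1) + 1 - 1)
      (by omega) (by push_cast; omega)
    rw [if_pos hsi1.symm, pvLen_eq x]
    have hch : ∀ j : Int, (p.length : Int) < j → j ≤ (p.length : Int) + (K + 1) + 1 - 1 →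
        PySem.List.pyGetD ('#' :: (p ++ List.replicate (K + 1 + 1) x)) j '#' = x :=
      fun j h1 h2 => char_at_run p x (K + 1 + 1) j (by omega) (by push_cast; omega)
    rcases wnd_cases x with hm | hm | hm
    · -- window 1: the inner scan range is empty
      rw [hm] at hget hv0 ihK ⊢
      rw [if_pos rfl]
      rw [show ((p.length : Int) + (K + 1) + 1 - (0 : Int)) = (p.length : Int) + (K + 1) + 1
          by ring]
      rw [show max 0 ((p.length : Int) + (K + 1) + 1) = (p.length : Int) + (K + 1) + 1 by omega]
      rw [PySem.List.pyRange_neg_one_eq_nil (by omega)]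
      simp only [pvInnerA]
      rw [hv0, ihK]
      apply snoc_map_step
      rw [pv_emod_emod]
      conv_rhs => rw [fA_succ, stepSum_one]
      rw [pv_mul_emod_right]
    · -- window 3
      rw [hm] at hget hv0 ihK ⊢
      rw [if_neg (by omega)]
      have hne : PySem.List.pyGetD ('#' :: (p ++ List.replicate (K + 1 + 1) x))
          ((p.length : Int)) '#' ≠ x := char_at_base p x (K + 1 + 1) hb (wnd_ne_hash x (by omega))
      match K with
      | 0 =>
        simp only [Nat.cast_add, Nat.cast_one, Nat.cast_zero, Nat.cast_ofNat] at hv0 hch ⊢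
        rw [innerA_break _ _ x (p.length : Int)
            (max 0 ((p.length : Int) + (0 + 1) + 1 - (3 : Int))) (by push_cast; omega)
            1 ((p.length : Int) + (0 + 1) + 1 - 1) (by push_cast; ring) hch hne]
        rw [PySem.List.pyRange_neg_one_cons (by omega),
            PySem.List.pyRange_neg_one_eq_nil (by omega)]
        simp only [List.map_cons, List.map_nil, List.sum_cons, List.sum_nil, add_zero]
        rw [show ((p.length : Int) + (0 + 1) + 1 - 1 - 1) = (p.length : Int) + ((0 : Nat) : Int)
            by push_cast; ring]
        rw [hget 0 (by omega), hv0, ihK]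
        apply snoc_map_step
        rw [pv_add_emod_left, pv_add_emod_right, ← mul_add]
        conv_rhs => rw [fA_succ, stepSum_three_one]
        rw [pv_mul_emod_right]
      | (K' + 1) =>
        simp only [Nat.cast_add, Nat.cast_one, Nat.cast_zero, Nat.cast_ofNat] at hv0 hch ⊢
        rw [show max 0 ((p.length : Int) + (K' + 1 + 1) + 1 - (3 : Int))
            = (p.length : Int) + K' by push_cast; omega]
        rw [innerA_full _ _ x ((p.length : Int) + K') 2
            ((p.length : Int) + (K' + 1 + 1) + 1 - 1) (by push_cast; ring)
            (fun j h1 h2 => hch j (by omega) (by omega))]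
        rw [PySem.List.pyRange_neg_one_cons (by omega),
            PySem.List.pyRange_neg_one_cons (by omega),
            PySem.List.pyRange_neg_one_eq_nil (by omega)]
        simp only [List.map_cons, List.map_nil, List.sum_cons, List.sum_nil, add_zero]
        rw [show ((p.length : Int) + (K' + 1 + 1) + 1 - 1 - 1)
            = (p.length : Int) + ((K' + 1 : Nat) : Int) by push_cast; ring]
        rw [hget (K' + 1) (by omega)]
        rw [show ((p.length : Int) + ((K' + 1 : Nat) : Int) - 1)
            = (p.length : Int) + ((K' : Nat) : Int) by push_cast; ring]
        rw [hget K' (by omega), hv0, ihK]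
        apply snoc_map_step
        have h1 := pv_modeq (lastP p * fA 3 (K' + 2))
        have h2 := pv_modeq (lastP p * fA 3 (K' + 1))
        have h3 := pv_modeq (lastP p * fA 3 K')
        have hX := (h1.add (h2.add h3))
        rw [show lastP p * fA 3 (K' + 2) + (lastP p * fA 3 (K' + 1) + lastP p * fA 3 K')
            = lastP p * (fA 3 (K' + 2) + fA 3 (K' + 1) + fA 3 K') by ring] at hX
        rw [show K' + 1 + 1 = K' + 2 by omega] at hX ⊢
        conv_rhs => rw [show K' + 2 + 1 = (K' + 2) + 1 from rfl, fA_succ, stepSum_three]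
        rw [pv_mul_emod_right]
        exact hX
    · -- window 4
      rw [hm] at hget hv0 ihK ⊢
      rw [if_neg (by omega)]
      have hne : PySem.List.pyGetD ('#' :: (p ++ List.replicate (K + 1 + 1) x))
          ((p.length : Int)) '#' ≠ x := char_at_base p x (K + 1 + 1) hb (wnd_ne_hash x (by omega))
      match K with
      | 0 =>
        simp only [Nat.cast_add, Nat.cast_one, Nat.cast_zero, Nat.cast_ofNat] at hv0 hch ⊢
        rw [innerA_break _ _ x (p.length : Int)
            (max 0 ((p.length : Int) + (0 + 1) + 1 - (4 : Int))) (by push_cast; omega)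
            1 ((p.length : Int) + (0 + 1) + 1 - 1) (by push_cast; ring) hch hne]
        rw [PySem.List.pyRange_neg_one_cons (by omega),
            PySem.List.pyRange_neg_one_eq_nil (by omega)]
        simp only [List.map_cons, List.map_nil, List.sum_cons, List.sum_nil, add_zero]
        rw [show ((p.length : Int) + (0 + 1) + 1 - 1 - 1) = (p.length : Int) + ((0 : Nat) : Int)
            by push_cast; ring]
        rw [hget 0 (by omega), hv0, ihK]
        apply snoc_map_step
        rw [pv_add_emod_left, pv_add_emod_right, ← mul_add]
        conv_rhs => rw [fA_succ, stepSum_four_one]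
        rw [pv_mul_emod_right]
      | 1 =>
        simp only [Nat.cast_add, Nat.cast_one, Nat.cast_zero, Nat.cast_ofNat] at hv0 hch ⊢
        rw [innerA_break _ _ x (p.length : Int)
            (max 0 ((p.length : Int) + (1 + 1) + 1 - (4 : Int))) (by push_cast; omega)
            2 ((p.length : Int) + (1 + 1) + 1 - 1) (by push_cast; ring) hch hne]
        rw [PySem.List.pyRange_neg_one_cons (by omega),
            PySem.List.pyRange_neg_one_cons (by omega),
            PySem.List.pyRange_neg_one_eq_nil (by omega)]
        simp only [List.map_cons, List.map_nil, List.sum_cons, List.sum_nil, add_zero]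
        rw [show ((p.length : Int) + (1 + 1) + 1 - 1 - 1) = (p.length : Int) + ((1 : Nat) : Int)
            by push_cast; ring]
        rw [hget 1 (by omega)]
        rw [show ((p.length : Int) + ((1 : Nat) : Int) - 1) = (p.length : Int) + ((0 : Nat) : Int)
            by push_cast; ring]
        rw [hget 0 (by omega), hv0, ihK]
        apply snoc_map_step
        have h1 := pv_modeq (lastP p * fA 4 2)
        have h2 := pv_modeq (lastP p * fA 4 1)
        have h3 := pv_modeq (lastP p * fA 4 0)
        have hX := (h1.add (h2.add h3))
        rw [show lastP p * fA 4 2 + (lastP p * fA 4 1 + lastP p * fA 4 0)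
            = lastP p * (fA 4 2 + fA 4 1 + fA 4 0) by ring] at hX
        conv_rhs => rw [show (1 : Nat) + 1 + 1 = 2 + 1 by omega, fA_succ, stepSum_four_two]
        rw [pv_mul_emod_right]
        exact hX
      | (K'' + 2) =>
        simp only [Nat.cast_add, Nat.cast_one, Nat.cast_zero, Nat.cast_ofNat] at hv0 hch ⊢
        rw [show max 0 ((p.length : Int) + (K'' + 2 + 1) + 1 - (4 : Int))
            = (p.length : Int) + K'' by push_cast; omega]
        rw [innerA_full _ _ x ((p.length : Int) + K'') 3
            ((p.length : Int) + (K'' + 2 + 1) + 1 - 1) (by push_cast; ring)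
            (fun j h1 h2 => hch j (by omega) (by omega))]
        rw [PySem.List.pyRange_neg_one_cons (by omega),
            PySem.List.pyRange_neg_one_cons (by omega),
            PySem.List.pyRange_neg_one_cons (by omega),
            PySem.List.pyRange_neg_one_eq_nil (by omega)]
        simp only [List.map_cons, List.map_nil, List.sum_cons, List.sum_nil, add_zero]
        rw [show ((p.length : Int) + (K'' + 2 + 1) + 1 - 1 - 1)
            = (p.length : Int) + ((K'' + 2 : Nat) : Int) by push_cast; ring]
        rw [hget (K'' + 2) (by omega)]
        rw [show ((p.length : Int) + ((K'' + 2 : Nat) : Int) - 1)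
            = (p.length : Int) + ((K'' + 1 : Nat) : Int) by push_cast; ring]
        rw [hget (K'' + 1) (by omega)]
        rw [show ((p.length : Int) + ((K'' + 1 : Nat) : Int) - 1)
            = (p.length : Int) + ((K'' : Nat) : Int) by push_cast; ring]
        rw [hget K'' (by omega), hv0, ihK]
        apply snoc_map_step
        have h1 := pv_modeq (lastP p * fA 4 (K'' + 3))
        have h2 := pv_modeq (lastP p * fA 4 (K'' + 2))
        have h3 := pv_modeq (lastP p * fA 4 (K'' + 1))
        have h4 := pv_modeq (lastP p * fA 4 K'')
        have hX := (h1.add (h2.add (h3.add h4)))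
        rw [show lastP p * fA 4 (K'' + 3) + (lastP p * fA 4 (K'' + 2)
              + (lastP p * fA 4 (K'' + 1) + lastP p * fA 4 K''))
            = lastP p * (fA 4 (K'' + 3) + fA 4 (K'' + 2) + fA 4 (K'' + 1) + fA 4 K'') by ring] at hX
        rw [show K'' + 2 + 1 = K'' + 3 by omega] at hX ⊢
        conv_rhs => rw [show K'' + 3 + 1 = (K'' + 3) + 1 from rfl, fA_succ, stepSum_four]
        rw [pv_mul_emod_right]
        exact hX

-- ----- main equivalence -----
theorem dp_eq_bval (u : List Char) : (pvDpA u).getD u.length 0 = pvBval u := by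
  obtain ⟨n, hn⟩ : ∃ n, u.length ≤ n := ⟨u.length, le_refl _⟩
  induction n generalizing u with
  | zero =>
    have hu : u = [] := by
      cases u with
      | nil => rfl
      | cons a b => simp at hn
    subst hu
    rw [dpA_nil]
    simp [pvBval, pvRunsB]
  | succ n ih =>
    rcases eq_or_ne u [] with hu | hu
    · subst hu
      rw [dpA_nil]
      simp [pvBval, pvRunsB]
    obtain ⟨p, x, K, hdec, hb⟩ := run_decomp u hu
    subst hdec
    rw [run_inv p x K hb]
    rw [show (p ++ List.replicate (K + 1) x).length = p.length + (K + 1) by simp]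
    rw [List.getD_append_right _ _ _ _ (by rw [dpA_length]; omega), dpA_length]
    rw [show p.length + (K + 1) - (p.length + 1) = K by omega]
    rw [PySem.List.getD_map_range _ _ _ _ (by omega)]
    show lastP p * fA (wnd x) (K + 1) % pvMod = _
    unfold pvBval
    rw [runs_snoc_run p x K hb, List.foldl_append]
    simp only [List.foldl_cons, List.foldl_nil]
    have hple : p.length ≤ n := by
      rw [List.length_append, List.length_replicate] at hn
      omega
    have hBp : (pvRunsB p).foldl (fun res r => res * pvWays (pvWin r.1) r.2 % pvMod) 1
        = pvBval p := rfl
    rw [hBp, ← ih p hple]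
    rw [pvWin_eq, pvWays_eq_fA (wnd x) (wnd_cases x) (K + 1)]
    rfl

-- ===== VERDICT (by name: the statement is the Claim_ definition above) =====
theorem countTexts_spec : Claim_equal_countTexts := by
  intro s _
  show countTexts s = countTexts_alt s
  unfold countTexts countTexts_alt
  rw [PySem.List.pyGetD_natCast]
  exact dp_eq_bval s.toList
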